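-- pv_equiv track=rewrite | github.com/skylab-kulubu/AGC_Questions_Archive | density_I/density.py | fn
-- ===== SOURCE A (Python) =====
-- def fn(lst: list[int]) -> int:
--     current_count = 0
--     subarray_sum = 0
--     max_count = 0
--     max_sum = 0
--     for num in lst:
--         if num != 0:
--             current_count += 1
--             subarray_sum += num
--         else:
--             if current_count >= max_count:
--                 if current_count > max_count or subarray_sum > max_sum:
--                     max_count = current_count
--                     max_sum = subarray_sum
--
--             current_count, subarray_sum = 0, 0
--
--     if current_count >= max_count:
--         if current_count > max_count or subarray_sum > max_sum:
--             max_sum = subarray_sum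
--
--     return max_sum
-- ===== SOURCE B (Python) =====
-- def fn(lst: list[int]) -> int:
--     # Build the table of maximal nonzero runs as (length, sum) pairs,
--     # then reduce with Python's lexicographic tuple max.
--     runs = []
--     cur = []
--     for x in lst:
--         if x != 0:
--             cur.append(x)
--         elif cur:
--             runs.append((len(cur), sum(cur)))
--             cur = []
--     if cur:
--         runs.append((len(cur), sum(cur)))
--     return max(runs, default=(0, 0))[1]
-- ===== Notes on version B (the rewrite author's own statement) =====
-- stated objective: simpler
-- what changed: B first materialises the list of maximal nonzero runs as (length, sum) pairs and then reduces it with Python's lexicographic tuple max with a zero default pair, instead of fusing the best-so-far (max_count, max_sum) update into the scan.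
import Mathlib
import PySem

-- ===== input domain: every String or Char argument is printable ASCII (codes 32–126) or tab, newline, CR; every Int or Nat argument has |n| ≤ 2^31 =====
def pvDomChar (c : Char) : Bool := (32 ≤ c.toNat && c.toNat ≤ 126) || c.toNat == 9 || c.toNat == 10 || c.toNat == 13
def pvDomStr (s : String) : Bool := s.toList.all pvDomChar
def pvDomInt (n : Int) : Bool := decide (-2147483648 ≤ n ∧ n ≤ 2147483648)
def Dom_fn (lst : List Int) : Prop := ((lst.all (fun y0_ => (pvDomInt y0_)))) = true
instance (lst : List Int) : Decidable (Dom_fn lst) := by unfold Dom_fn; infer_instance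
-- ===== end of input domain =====

-- B builds the table of maximal nonzero runs first and then reduces it with a
-- lexicographic max; A fuses the best-so-far update into the scan. Same cost.

-- ===== PORT A =====
-- loop body of A: state = (current_count, subarray_sum, max_count, max_sum)
def fnStep (s : Int × Int × Int × Int) (num : Int) : Int × Int × Int × Int :=
  let (cc, ss, mc, ms) := s
  if num ≠ 0 then (cc + 1, ss + num, mc, ms)
  else if cc ≥ mc ∧ (cc > mc ∨ ss > ms) then (0, 0, cc, ss)
  else (0, 0, mc, ms)

-- A's final flush after the loop
def fnFinish (s : Int × Int × Int × Int) : Int :=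
  let (cc, ss, mc, ms) := s
  if cc ≥ mc ∧ (cc > mc ∨ ss > ms) then ss else ms

def fn (lst : List Int) : Int :=
  fnFinish (lst.foldl fnStep (0, 0, 0, 0))

-- ===== PORT B =====
-- loop body of B: state = (runs, cur)
def fnAltStep (s : List (Int × Int) × List Int) (x : Int) : List (Int × Int) × List Int :=
  if x ≠ 0 then (s.1, s.2 ++ [x])
  else if s.2 ≠ [] then (s.1 ++ [((s.2.length : Int), s.2.sum)], [])
  else s

-- Python's tuple max: keep the lexicographically larger pair, the first one on ties
def fnLMax (b x : Int × Int) : Int × Int :=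
  if x.1 > b.1 ∨ (x.1 = b.1 ∧ x.2 > b.2) then x else b

-- B after the loop: flush the trailing run, then max(runs, default=(0,0))[1]
def fnAltFinish (s : List (Int × Int) × List Int) : Int :=
  let runs := if s.2 ≠ [] then s.1 ++ [((s.2.length : Int), s.2.sum)] else s.1
  (match runs with
   | [] => ((0 : Int), (0 : Int))
   | r :: rs => rs.foldl fnLMax r).2

def fn_alt (lst : List Int) : Int :=
  fnAltFinish (lst.foldl fnAltStep ([], []))

-- ===== PRECONDITION & SPEC =====
def Spec_fn (lst : List Int) (out : Int) : Prop := out = fn_alt lst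
instance (lst : List Int) (out : Int) : Decidable (Spec_fn lst out) := by unfold Spec_fn; infer_instance

-- ===== CLAIM (what is proved, stated in full; the proofs are below) =====
def Claim_equal_fn : Prop := ∀ (lst : List Int), Dom_fn lst → Spec_fn lst (fn lst)

-- ===== LEMMAS AND PROOFS =====

-- when every run has positive length, Python's max over the run list equals the
-- fold of fnLMax from the default (0, 0)
theorem fnMatch_eq_foldl (runs : List (Int × Int)) :
    (∀ r ∈ runs, 1 ≤ r.1) →
    (match runs with
     | [] => ((0 : Int), (0 : Int))
     | r :: rs => rs.foldl fnLMax r) = runs.foldl fnLMax (0, 0) := by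
  cases runs with
  | nil => intro _; rfl
  | cons r rs =>
    intro h
    simp only [List.foldl_cons]
    congr 1
    have h1 : 1 ≤ r.1 := h r (by simp)
    simp only [fnLMax]
    split_ifs with hc
    · rfl
    · omega

-- the loop invariant: A's running (max_count, max_sum) is the fnLMax-fold of B's runs
theorem fn_loop (lst : List Int) : ∀ (cur : List Int) (runs : List (Int × Int)) (mc ms : Int),
    0 ≤ mc → (mc = 0 → ms = 0) → (∀ r ∈ runs, 1 ≤ r.1) →
    (mc, ms) = runs.foldl fnLMax (0, 0) →
    fnFinish (lst.foldl fnStep ((cur.length : Int), cur.sum, mc, ms)) =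
    fnAltFinish (lst.foldl fnAltStep (runs, cur)) := by
  induction lst with
  | nil =>
    intro cur runs mc ms hmc hms hr hfold
    simp only [List.foldl_nil, fnFinish, fnAltFinish]
    by_cases hc : cur = []
    · subst hc
      have hC : ¬ (((([] : List Int).length : Int)) ≥ mc ∧
          ((([] : List Int).length : Int) > mc ∨ ([] : List Int).sum > ms)) := by
        simp only [List.length_nil, List.sum_nil, Int.natCast_zero]
        rintro ⟨h1, h2⟩
        have hmc0 : mc = 0 := le_antisymm h1 hmc
        have := hms hmc0
        omega
      rw [if_neg hC]
      simp only [ne_eq, not_true_eq_false, if_false]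
      rw [fnMatch_eq_foldl runs hr, ← hfold]
    · have hL : 1 ≤ (cur.length : Int) := by
        have : cur.length ≠ 0 := by simpa using hc
        omega
      have hif : (if cur ≠ [] then runs ++ [((cur.length : Int), cur.sum)] else runs)
          = runs ++ [((cur.length : Int), cur.sum)] := if_pos hc
      rw [hif]
      rw [fnMatch_eq_foldl (runs ++ [((cur.length : Int), cur.sum)]) (by
        intro r hrm
        rcases List.mem_append.mp hrm with h | h
        · exact hr r h
        · simp at h; subst h; exact hL)]
      rw [List.foldl_append, ← hfold]
      simp only [List.foldl_cons, List.foldl_nil, fnLMax]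
      split_ifs with h1 h2 h2 <;> first | rfl | omega
  | cons x xs ih =>
    intro cur runs mc ms hmc hms hr hfold
    simp only [List.foldl_cons]
    by_cases hx : x = 0
    · subst hx
      by_cases hc : cur = []
      · subst hc
        have hs : fnStep ((([] : List Int).length : Int), ([] : List Int).sum, mc, ms) 0 =
            ((([] : List Int).length : Int), ([] : List Int).sum, mc, ms) := by
          simp only [fnStep, List.length_nil, List.sum_nil, Int.natCast_zero, ne_eq,
            not_true_eq_false, if_false]
          split_ifs with h
          · obtain ⟨h1, h2⟩ := h
            have hmc0 : mc = 0 := le_antisymm h1 hmc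
            have := hms hmc0
            omega
          · rfl
        have hs' : fnAltStep (runs, ([] : List Int)) 0 = (runs, ([] : List Int)) := by
          simp [fnAltStep]
        rw [hs, hs']
        exact ih [] runs mc ms hmc hms hr hfold
      · have hL : 1 ≤ (cur.length : Int) := by
          have : cur.length ≠ 0 := by simpa using hc
          omega
        have hs' : fnAltStep (runs, cur) 0 =
            (runs ++ [((cur.length : Int), cur.sum)], ([] : List Int)) := by
          simp only [fnAltStep, ne_eq, not_true_eq_false, if_false]
          rw [if_pos hc]
        have hr' : ∀ r ∈ runs ++ [((cur.length : Int), cur.sum)], 1 ≤ r.1 := by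
          intro r hrm
          rcases List.mem_append.mp hrm with h | h
          · exact hr r h
          · simp at h; subst h; exact hL
        rw [hs']
        by_cases hC : ((cur.length : Int)) ≥ mc ∧ ((cur.length : Int) > mc ∨ cur.sum > ms)
        · have hs : fnStep ((cur.length : Int), cur.sum, mc, ms) 0 =
              ((([] : List Int).length : Int), ([] : List Int).sum, (cur.length : Int), cur.sum) := by
            simp only [fnStep, ne_eq, not_true_eq_false, if_false, if_pos hC]
            simp
          rw [hs]
          refine ih [] (runs ++ [((cur.length : Int), cur.sum)]) _ _ (by omega) (by omega) hr' ?_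
          rw [List.foldl_append, ← hfold]
          simp only [List.foldl_cons, List.foldl_nil, fnLMax]
          rw [if_pos (by omega)]
        · have hs : fnStep ((cur.length : Int), cur.sum, mc, ms) 0 =
              ((([] : List Int).length : Int), ([] : List Int).sum, mc, ms) := by
            simp only [fnStep, ne_eq, not_true_eq_false, if_false, if_neg hC]
            simp
          rw [hs]
          refine ih [] (runs ++ [((cur.length : Int), cur.sum)]) mc ms hmc hms hr' ?_
          rw [List.foldl_append, ← hfold]
          simp only [List.foldl_cons, List.foldl_nil, fnLMax]
          rw [if_neg (by omega)]
    · have hs : fnStep ((cur.length : Int), cur.sum, mc, ms) x =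
          (((cur ++ [x]).length : Int), (cur ++ [x]).sum, mc, ms) := by
        simp only [fnStep, if_pos hx, List.length_append, List.sum_append, List.length_cons,
          List.length_nil, List.sum_cons, List.sum_nil]
        push_cast
        ring_nf
      have hs' : fnAltStep (runs, cur) x = (runs, cur ++ [x]) := by
        simp [fnAltStep, hx]
      rw [hs, hs']
      exact ih (cur ++ [x]) runs mc ms hmc hms hr hfold

-- ===== VERDICT (by name: the statement is the Claim_ definition above) =====
theorem fn_spec : Claim_equal_fn := by
  intro lst _
  unfold Spec_fn fn fn_alt
  have := fn_loop lst [] [] 0 0 le_rfl (fun _ => rfl) (by simp) (by simp)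
  simpa using this
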